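-- pv_equiv track=rewrite | github.com/0xPuddi/Algorithms | src/algorithms/better_algo_293.py | better_x_hash
-- ===== SOURCE A (Python) =====
-- def better_x_hash(A, B):
--     if len(B) > len(A):
--         return False
--
--     D = {}
--     for j in range(len(B)):
--         if B[j] not in D:
--             D[B[j]] = 1
--             continue
--
--         D[B[j]] += 1
--
--     for i in range(len(A)):
--         if A[i] not in D:
--             continue
--
--         D[A[i]] -= 1
--
--     for d in D:
--         if D.get(d) > 0:
--             return False
--
--     return True
-- ===== SOURCE B (Python) =====
-- def better_x_hash(A, B):
--     return all(A.count(x) >= B.count(x) for x in set(B))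
-- ===== Notes on version B (the rewrite author's own statement) =====
-- stated objective: simpler
-- what changed: Replaces the length guard plus build-a-count-dict-then-decrement-then-scan strategy with a one-line check that compares occurrence counts of each distinct element of B by repeated linear scans (list.count) of A and B; the length guard is dropped as redundant.
import Mathlib
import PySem

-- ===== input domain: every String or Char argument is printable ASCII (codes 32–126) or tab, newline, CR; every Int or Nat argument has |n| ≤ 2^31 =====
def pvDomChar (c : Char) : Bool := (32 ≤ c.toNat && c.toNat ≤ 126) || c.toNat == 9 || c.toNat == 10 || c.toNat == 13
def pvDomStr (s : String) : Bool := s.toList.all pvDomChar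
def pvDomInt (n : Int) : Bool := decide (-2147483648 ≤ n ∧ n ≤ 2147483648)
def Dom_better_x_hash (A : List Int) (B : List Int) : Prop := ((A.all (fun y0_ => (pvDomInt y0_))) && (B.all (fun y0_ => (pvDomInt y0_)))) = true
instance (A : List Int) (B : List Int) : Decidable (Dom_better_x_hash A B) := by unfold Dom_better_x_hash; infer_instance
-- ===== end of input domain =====

-- B replaces A's count-dict build/decrement/scan with a one-line per-distinct-element
-- count comparison (objective: simpler); A's redundant length guard is dropped.

-- ===== PORT A =====
-- literal port of A: length guard, build count dict over B, decrement along A, scan the dict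
def better_x_hash (A : List Int) (B : List Int) : Bool :=
  if B.length > A.length then false
  else
    let D1 : PySem.Dict Int Int := B.foldl (fun D b =>
      if D.get? b = none then D.insert b 1 else D.modify b 0 (· + 1)) PySem.Dict.empty
    let D2 : PySem.Dict Int Int := A.foldl (fun D a =>
      if D.get? a = none then D else D.modify a 0 (· - 1)) D1
    D2.keys.all (fun d => !decide (D2.getD d 0 > 0))

-- ===== PORT B =====
-- literal port of Source B: all(A.count(x) >= B.count(x) for x in set(B))
def better_x_hash_alt (A : List Int) (B : List Int) : Bool :=
  (PySem.Set.ofList B).all (fun x => decide (PySem.List.count B x <= PySem.List.count A x))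

-- ===== PRECONDITION & SPEC =====
def Spec_better_x_hash (A : List Int) (B : List Int) (out : Bool) : Prop := out = better_x_hash_alt A B
instance (A : List Int) (B : List Int) (out : Bool) : Decidable (Spec_better_x_hash A B out) := by unfold Spec_better_x_hash; infer_instance

-- ===== CLAIM (what is proved, stated in full; the proofs are below) =====
def Claim_equal_better_x_hash : Prop := ∀ (A : List Int) (B : List Int), Dom_better_x_hash A B → Spec_better_x_hash A B (better_x_hash A B)

-- ===== LEMMAS AND PROOFS =====

-- A's first loop builds exactly Counter(B)
theorem pv_build_eq_counter (B : List Int) :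
    B.foldl (fun D b =>
      if D.get? b = none then D.insert b 1 else D.modify b 0 (· + 1)) PySem.Dict.empty
      = PySem.Dict.counter B := by
  rw [PySem.Dict.counter_eq_foldl]
  have hstep : ∀ (D : PySem.Dict Int Int) (b : Int),
      (if D.get? b = none then D.insert b 1 else D.modify b 0 (· + 1))
        = D.modify b 0 (· + 1) := by
    intro D b
    by_cases h : D.get? b = none
    · have hc : D.contains b = false := (PySem.Dict.get?_eq_none_iff_contains D b).1 h
      simp [h, PySem.Dict.modify, PySem.Dict.getD_of_not_contains D 0 hc]
    · simp [h]
  simp only [hstep]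

-- a helper: a key present in D stays; get? ≠ none means contains
theorem pv_contains_of_get?_ne_none (D : PySem.Dict Int Int) (a : Int)
    (h : ¬ D.get? a = none) : D.contains a = true := by
  cases hcc : D.contains a
  · exact absurd ((PySem.Dict.get?_eq_none_iff_contains D a).2 hcc) h
  · rfl

-- A's second loop never changes the key set
theorem pv_decr_keys (A : List Int) (D : PySem.Dict Int Int) :
    (A.foldl (fun D a =>
      if D.get? a = none then D else D.modify a 0 (· - 1)) D).keys = D.keys := by
  induction A generalizing D with
  | nil => rfl
  | cons a A ih =>
      simp only [List.foldl_cons]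
      by_cases h : D.get? a = none
      · simp [h, ih]
      · have hc := pv_contains_of_get?_ne_none D a h
        rw [if_neg h, ih, PySem.Dict.keys_modify,
          PySem.Dict.keys_insert_of_contains D _ hc]

-- A's second loop subtracts the count in A at every existing key
theorem pv_decr_getD (A : List Int) (D : PySem.Dict Int Int) (x : Int) :
    (A.foldl (fun D a =>
      if D.get? a = none then D else D.modify a 0 (· - 1)) D).getD x 0
      = D.getD x 0 - (if D.contains x then (List.count x A : Int) else 0) := by
  induction A generalizing D with
  | nil => simp
  | cons a A ih =>
      simp only [List.foldl_cons]
      by_cases h : D.get? a = none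
      · have hca : D.contains a = false := (PySem.Dict.get?_eq_none_iff_contains D a).1 h
        rw [if_pos h, ih]
        by_cases hx : D.contains x
        · have hax : ¬ (a == x) = true := by
            intro he
            rw [eq_of_beq he] at hca; rw [hca] at hx; exact absurd hx (by simp)
          simp [hx, List.count_cons, hax]
        · simp [hx]
      · have hca := pv_contains_of_get?_ne_none D a h
        rw [if_neg h, ih]
        have hck : (D.modify a 0 (· - 1)).contains x = D.contains x := by
          rw [PySem.Dict.contains_modify]
          by_cases hxa : x = a
          · subst hxa; simp [hca]
          · simp [hxa]
        rw [hck, PySem.Dict.getD_modify]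
        by_cases hxa : x = a
        · subst hxa
          simp [hca]
          ring
        · have hax : ¬ (a == x) = true := fun he => hxa (eq_of_beq he).symm
          by_cases hx : D.contains x
          · simp [hx, hxa, hax, List.count_cons]
          · simp [hx, hxa]

-- the count condition forces len(B) ≤ len(A), so A's guard is redundant
theorem pv_count_le_length (A B : List Int)
    (h : ∀ x ∈ B, List.count x B ≤ List.count x A) : B.length ≤ A.length := by
  have hle : (B : Multiset Int) ≤ (A : Multiset Int) := by
    rw [Multiset.le_iff_count]
    intro a
    simp only [Multiset.coe_count]
    by_cases ha : a ∈ B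
    · exact h a ha
    · simp [List.count_eq_zero_of_not_mem ha]
  simpa using Multiset.card_le_card hle

-- alt is true iff every element of B is covered by A
theorem pv_alt_iff (A B : List Int) :
    better_x_hash_alt A B = true ↔ ∀ x ∈ B, List.count x B ≤ List.count x A := by
  unfold better_x_hash_alt
  rw [List.all_eq_true]
  constructor
  · intro h x hx
    have := h x ((PySem.Set.mem_ofList B x).2 hx)
    simpa [PySem.List.count_eq] using this
  · intro h x hx
    have := h x ((PySem.Set.mem_ofList B x).1 hx)
    simpa [PySem.List.count_eq] using this

-- ===== VERDICT (by name: the statement is the Claim_ definition above) =====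
theorem better_x_hash_spec : Claim_equal_better_x_hash := by
  intro A B _
  unfold Spec_better_x_hash better_x_hash
  by_cases hlen : B.length > A.length
  · have hb : better_x_hash_alt A B = false := by
      cases hb : better_x_hash_alt A B
      · rfl
      · exact absurd (pv_count_le_length A B ((pv_alt_iff A B).1 hb)) (by omega)
    rw [if_pos hlen, hb]
  · rw [if_neg hlen]
    simp only [pv_build_eq_counter]
    rw [Bool.eq_iff_iff, List.all_eq_true, pv_alt_iff]
    constructor
    · intro h x hx
      have hxk : x ∈ (A.foldl (fun D a =>
          if D.get? a = none then D else D.modify a 0 (· - 1)) (PySem.Dict.counter B)).keys := by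
        rw [pv_decr_keys, PySem.Dict.keys_counter]
        exact (PySem.Set.mem_ofList B x).2 hx
      have := h x hxk
      rw [pv_decr_getD, PySem.Dict.getD_counter] at this
      have hc : (PySem.Dict.counter B).contains x = true := by
        rw [PySem.Dict.contains_counter]; simpa using hx
      rw [if_pos hc] at this
      simp at this
      omega
    · intro h x hxk
      rw [pv_decr_keys, PySem.Dict.keys_counter] at hxk
      have hx : x ∈ B := (PySem.Set.mem_ofList B x).1 hxk
      rw [pv_decr_getD, PySem.Dict.getD_counter]
      have hc : (PySem.Dict.counter B).contains x = true := by
        rw [PySem.Dict.contains_counter]; simpa using hx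
      rw [if_pos hc]
      have := h x hx
      simp
      omega
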